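-- pv_equiv track=rewrite | github.com/Adelino347/matrices_calculator | funcoes/identificadorDeTipos.py | isMatrizDeVandermonde
-- ===== SOURCE A (Python) =====
-- def isMatrizQuadrada(matriz):
--     """
--     Dada uma matriz analisa se ela é uma matriz quadrada (matriz que possui o números
--     de linhas equivalente ao número de colunas) e retorna True ou False.
--     """
--     resultado = True
--     m = len(matriz)
--     for linha in matriz:
--         n = len(linha)
--         if m != n:
--             resultado = False
--             break
--
--     return resultado
--
-- def isMatrizDeVandermonde(matriz):
--     """
--     Dada uma matriz cujos itens são números reais(float) ou inteiros(int),
--     analisa se ela é uma matriz de Vandermonde e retorna True ou False.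
--     """
--     linha1VD = []
--     for elemento in matriz[0]:
--         linha1VD.append(1)
--
--     if isMatrizQuadrada(matriz) and matriz[0] == linha1VD and len(matriz)>1:
--         resultado = True
--         linha2 = matriz[1]
--         expoente = 1
--         for linha in matriz[2:]:
--             expoente += 1
--             for j in range(len(linha)):
--                 if linha[j] != (linha2[j]**expoente):
--                     resultado = False
--                     break
--
--         return resultado
--
--     else:
--         return False
-- ===== SOURCE B (Python) =====
-- def isMatrizDeVandermonde(matriz):
--     """B: single pass over consecutive row pairs checking the multiplicative
--     recurrence cur[j] == prev[j] * base[j] (no exponentiation at all); with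
--     row 0 all ones this recurrence holds iff row i is base**i elementwise."""
--     n = len(matriz)
--     if n < 2 or any(len(linha) != n for linha in matriz):
--         return False
--     if any(x != 1 for x in matriz[0]):
--         return False
--     base = matriz[1]
--     return all(b == a * c
--                for prev, cur in zip(matriz, matriz[1:])
--                for a, b, c in zip(prev, cur, base))
-- ===== Notes on version B (the rewrite author's own statement) =====
-- stated objective: alternative
-- what changed: Instead of comparing each row elementwise against base[j]**i with Python exponentiation, B verifies the multiplicative recurrence cur[j] == prev[j]*base[j] between consecutive rows in one pass over zipped row pairs (correct because with an all-ones first row the geometric recurrence per column is equivalent to row i equalling base**i).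
import Mathlib
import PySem

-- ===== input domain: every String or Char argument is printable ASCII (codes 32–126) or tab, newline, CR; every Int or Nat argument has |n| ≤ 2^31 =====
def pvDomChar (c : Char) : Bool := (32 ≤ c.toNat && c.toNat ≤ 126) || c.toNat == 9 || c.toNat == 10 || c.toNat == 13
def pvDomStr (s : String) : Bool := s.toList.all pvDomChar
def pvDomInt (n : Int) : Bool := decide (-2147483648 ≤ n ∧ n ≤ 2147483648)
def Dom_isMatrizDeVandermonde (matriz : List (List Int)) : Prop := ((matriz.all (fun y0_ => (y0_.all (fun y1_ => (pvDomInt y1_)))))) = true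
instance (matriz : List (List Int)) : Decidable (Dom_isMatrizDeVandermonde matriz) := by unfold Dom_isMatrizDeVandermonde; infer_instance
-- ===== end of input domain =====

-- B replaces A's per-element power comparison row[i][j] == base[j]**i with a single pass
-- over consecutive row pairs checking the multiplicative recurrence cur[j] = prev[j]*base[j]
-- (objective: alternative; no exponentiation in B).

-- ===== PORT A =====
-- loop of isMatrizQuadrada: break on first row of wrong length
def pvQuadLoop (m : Nat) : List (List Int) → Bool
  | [] => true
  | linha :: rest => if m ≠ linha.length then false else pvQuadLoop m rest

def isMatrizQuadrada (matriz : List (List Int)) : Bool :=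
  pvQuadLoop matriz.length matriz

-- inner loop 'for j in range(len(linha))' with break; indices are always in range when
-- this is reached (the matrix is square there), so List.getD is exact for Python's linha[j]
def pvInnerLoop (linha linha2 : List Int) (expoente : Nat) (n j : Nat) : Bool :=
  if j < n then
    if linha.getD j 0 ≠ (linha2.getD j 0) ^ expoente then false
    else pvInnerLoop linha linha2 expoente n (j + 1)
  else true
termination_by n - j

-- outer loop over matriz[2:], carrying expoente and the sticky resultado flag
def pvOuterLoop (linha2 : List Int) : List (List Int) → Nat → Bool → Bool
  | [], _, resultado => resultado
  | linha :: rest, expoente, resultado =>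
      pvOuterLoop linha2 rest (expoente + 1)
        (if pvInnerLoop linha linha2 (expoente + 1) linha.length 0 then resultado else false)

def isMatrizDeVandermonde (matriz : List (List Int)) : Bool :=
  match matriz with
  | [] => false  -- Python raises IndexError here (outside Pre_)
  | linha0 :: _ =>
    -- linha1VD = [1 for elemento in matriz[0]]
    if isMatrizQuadrada matriz && (linha0 == linha0.map (fun _ => (1 : Int)))
        && decide (matriz.length > 1) then
      -- linha2 = matriz[1] (in range: len(matriz) > 1); matriz[2:] = drop 2
      pvOuterLoop (matriz.getD 1 []) (matriz.drop 2) 1 true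
    else false

-- ===== PORT B =====
def isMatrizDeVandermonde_alt (matriz : List (List Int)) : Bool :=
  if matriz.length < 2 || matriz.any (fun linha => linha.length != matriz.length) then false
  else if (matriz.getD 0 []).any (fun x => x != 1) then false
  else
    -- base = matriz[1] (in range: n ≥ 2); zip(matriz, matriz[1:]) and zip(prev, cur, base)
    (matriz.zip (matriz.drop 1)).all (fun pc =>
      ((pc.1.zip pc.2).zip (matriz.getD 1 [])).all (fun t =>
        t.1.2 == t.1.1 * t.2))

-- ===== PRECONDITION & SPEC =====
-- Pre_ excludes only the empty matrix, on which A raises IndexError at matriz[0].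
def Pre_isMatrizDeVandermonde (matriz : List (List Int)) : Prop := matriz ≠ []
instance (matriz : List (List Int)) : Decidable (Pre_isMatrizDeVandermonde matriz) := by unfold Pre_isMatrizDeVandermonde; infer_instance
def pvWitness_isMatrizDeVandermonde : List (List Int) := [[1, 1], [2, 3]]

def Spec_isMatrizDeVandermonde (matriz : List (List Int)) (out : Bool) : Prop := out = isMatrizDeVandermonde_alt matriz
instance (matriz : List (List Int)) (out : Bool) : Decidable (Spec_isMatrizDeVandermonde matriz out) := by unfold Spec_isMatrizDeVandermonde; infer_instance

-- ===== CLAIM (what is proved, stated in full; the proofs are below) =====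
def Claim_equal_isMatrizDeVandermonde : Prop := ∀ (matriz : List (List Int)), Dom_isMatrizDeVandermonde matriz → Pre_isMatrizDeVandermonde matriz → Spec_isMatrizDeVandermonde matriz (isMatrizDeVandermonde matriz)

-- ===== LEMMAS AND PROOFS =====

-- column access used only by the proofs
def pvColv (matriz : List (List Int)) (j i : Nat) : Int := (matriz.getD i []).getD j 0

theorem pvQuadLoop_eq_all (m : Nat) (l : List (List Int)) :
    pvQuadLoop m l = l.all (fun r => r.length == m) := by
  induction l with
  | nil => rfl
  | cons x xs ih =>
    by_cases h : m = x.length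
    · subst h; simp [pvQuadLoop, ih]
    · simp [pvQuadLoop, h, Ne.symm h]

theorem pvInnerLoop_eq (linha linha2 : List Int) (e n j : Nat) :
    pvInnerLoop linha linha2 e n j
      = decide (∀ k, j ≤ k → k < n → linha.getD k 0 = (linha2.getD k 0) ^ e) := by
  rw [pvInnerLoop]
  by_cases hj : j < n
  · rw [if_pos hj]
    by_cases hm : linha.getD j 0 = (linha2.getD j 0) ^ e
    · rw [if_neg (not_not_intro hm)]
      rw [pvInnerLoop_eq linha linha2 e n (j + 1), decide_eq_decide]
      constructor
      · intro h k hk1 hk2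
        rcases Nat.eq_or_lt_of_le hk1 with rfl | hlt
        · exact hm
        · exact h k hlt hk2
      · intro h k hk1 hk2
        exact h k (Nat.le_of_succ_le hk1) hk2
    · rw [if_pos hm]
      symm
      rw [decide_eq_false_iff_not]
      intro h
      exact hm (h j le_rfl hj)
  · rw [if_neg hj]
    symm
    rw [decide_eq_true_eq]
    intro k h1 h2
    omega
termination_by n - j

theorem pvOuterLoop_false (linha2 : List Int) (rows : List (List Int)) (e : Nat) :
    pvOuterLoop linha2 rows e false = false := by
  induction rows generalizing e with
  | nil => rfl
  | cons x xs ih => simp [pvOuterLoop, ih]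

theorem pvOuterLoop_char (linha2 : List Int) (rows : List (List Int)) (e : Nat) :
    pvOuterLoop linha2 rows e true = true ↔
      ∀ i (h : i < rows.length),
        pvInnerLoop rows[i] linha2 (e + 1 + i) rows[i].length 0 = true := by
  induction rows generalizing e with
  | nil => simp [pvOuterLoop]
  | cons x xs ih =>
    simp only [pvOuterLoop]
    by_cases h : pvInnerLoop x linha2 (e + 1) x.length 0 = true
    · rw [if_pos h, ih (e + 1)]
      constructor
      · intro hall i hi
        match i with
        | 0 => simpa using h
        | Nat.succ j =>
          have hj : j < xs.length := by simpa using hi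
          have := hall j hj
          simpa [Nat.add_assoc, Nat.add_comm, Nat.add_left_comm] using this
      · intro hall j hj
        have := hall (j + 1) (by simpa using Nat.succ_lt_succ hj)
        simpa [Nat.add_assoc, Nat.add_comm, Nat.add_left_comm] using this
    · rw [if_neg h, pvOuterLoop_false]
      constructor
      · intro hf; exact absurd hf (by simp)
      · intro hall
        have := hall 0 (by simp)
        simp only [List.getElem_cons_zero] at this
        exact absurd this h

-- the geometric recurrence per column is equivalent to the explicit-power characterisation
theorem pvColRec_iff (N : Nat) (v : Nat → Int) (b : Int) (h0 : v 0 = 1) :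
    (∀ i, i + 1 < N → v (i + 1) = v i * b) ↔ (∀ i, i < N → v i = b ^ i) := by
  constructor
  · intro h i
    induction i with
    | zero => intro _; simpa using h0
    | succ k ih =>
      intro hk
      rw [h k hk, ih (by omega)]
      ring
  · intro h i hi
    rw [h (i + 1) hi, h i (by omega)]
    ring


theorem pvAllIdx {A : Type} (l : List A) (p : A → Bool) :
    l.all p = true ↔ ∀ i (h : i < l.length), p l[i] = true := by
  rw [List.all_eq_true]
  constructor
  · intro h i hi; exact h _ (l.getElem_mem hi)
  · intro h x hx
    obtain ⟨i, hi, rfl⟩ := List.mem_iff_getElem.mp hx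
    exact h i hi

-- B's zipped double-all, on a square matrix, says exactly the per-column recurrence
theorem pvBAll_char (matriz : List (List Int)) (base : List Int)
    (hsq : ∀ r ∈ matriz, r.length = matriz.length)
    (hbl : base.length = matriz.length) :
    (((matriz.zip (matriz.drop 1)).all (fun pc =>
      ((pc.1.zip pc.2).zip base).all (fun t => t.1.2 == t.1.1 * t.2))) = true)
    ↔ (∀ i, i + 1 < matriz.length → ∀ j, j < matriz.length →
        pvColv matriz j (i + 1) = pvColv matriz j i * base.getD j 0) := by
  have hzl : (matriz.zip (matriz.drop 1)).length = matriz.length - 1 := by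
    simp [List.length_zip]
  rw [pvAllIdx]
  constructor
  · intro h i hi j hj
    have hi' : i < (matriz.zip (matriz.drop 1)).length := by omega
    have hIm : i < matriz.length := by omega
    have hIm' : 1 + i < matriz.length := by omega
    have hdlen : i < (matriz.drop 1).length := by simp; omega
    have hdrop : (matriz.drop 1)[i]'hdlen = matriz[1 + i]'hIm' := List.getElem_drop
    have hli : matriz[i].length = matriz.length := hsq _ (List.getElem_mem hIm)
    have hli' : ((matriz.drop 1)[i]'hdlen).length = matriz.length := by
      rw [hdrop]; exact hsq _ (List.getElem_mem hIm')
    have h1 := h i hi'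
    rw [List.getElem_zip] at h1
    rw [pvAllIdx] at h1
    have hj' : j < ((matriz[i].zip ((matriz.drop 1)[i]'hdlen)).zip base).length := by
      simp only [List.length_zip, hli, hli', hbl]; omega
    have h2 := h1 j hj'
    rw [List.getElem_zip, List.getElem_zip] at h2
    simp only [beq_iff_eq] at h2
    have hg1 : ((matriz.drop 1)[i]'hdlen)[j]'(by omega) = pvColv matriz j (i + 1) := by
      unfold pvColv
      rw [show i + 1 = 1 + i from by omega, List.getD_eq_getElem matriz _ hIm', ← hdrop,
          List.getD_eq_getElem]
    have hg2 : (matriz[i]'hIm)[j]'(by omega) = pvColv matriz j i := by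
      unfold pvColv
      rw [List.getD_eq_getElem matriz _ hIm, List.getD_eq_getElem]
    have hg3 : base[j]'(by omega) = base.getD j 0 := (List.getD_eq_getElem _ _ _).symm
    rw [hg1, hg2, hg3] at h2
    exact h2
  · intro h i hi
    have hIm : i < matriz.length := by omega
    have hIm' : 1 + i < matriz.length := by omega
    have hdlen : i < (matriz.drop 1).length := by simp; omega
    have hdrop : (matriz.drop 1)[i]'hdlen = matriz[1 + i]'hIm' := List.getElem_drop
    have hli : matriz[i].length = matriz.length := hsq _ (List.getElem_mem hIm)
    have hli' : ((matriz.drop 1)[i]'hdlen).length = matriz.length := by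
      rw [hdrop]; exact hsq _ (List.getElem_mem hIm')
    rw [List.getElem_zip, pvAllIdx]
    intro j hj'
    have hjm : j < matriz.length := by
      simp only [List.length_zip, hli, hli', hbl] at hj'
      omega
    have h2 := h i (by omega) j hjm
    rw [List.getElem_zip, List.getElem_zip]
    simp only [beq_iff_eq]
    have hg1 : ((matriz.drop 1)[i]'hdlen)[j]'(by omega) = pvColv matriz j (i + 1) := by
      unfold pvColv
      rw [show i + 1 = 1 + i from by omega, List.getD_eq_getElem matriz _ hIm', ← hdrop,
          List.getD_eq_getElem]
    have hg2 : (matriz[i]'hIm)[j]'(by omega) = pvColv matriz j i := by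
      unfold pvColv
      rw [List.getD_eq_getElem matriz _ hIm, List.getD_eq_getElem]
    have hg3 : base[j]'(by omega) = base.getD j 0 := (List.getD_eq_getElem _ _ _).symm
    rw [hg1, hg2, hg3]
    exact h2

-- ===== VERDICT (by name: the statement is the Claim_ definition above) =====
theorem isMatrizDeVandermonde_spec : Claim_equal_isMatrizDeVandermonde := by
  intro matriz _ hpre
  unfold Spec_isMatrizDeVandermonde
  match matriz with
  | [] => exact absurd rfl hpre
  | [linha0] =>
    simp [isMatrizDeVandermonde, isMatrizDeVandermonde_alt]
  | linha0 :: r1 :: rest2 =>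
    by_cases hsq : ∀ r ∈ (linha0 :: r1 :: rest2), r.length = (linha0 :: r1 :: rest2).length
    · -- square matrix
      have hquad : pvQuadLoop (linha0 :: r1 :: rest2).length (linha0 :: r1 :: rest2) = true := by
        rw [pvQuadLoop_eq_all]
        simp only [List.all_eq_true, beq_iff_eq]
        exact hsq
      have hanyf : ((linha0 :: r1 :: rest2).any
          fun linha => linha.length != (linha0 :: r1 :: rest2).length) = false := by
        simp only [List.any_eq_false]
        intro x hx
        simp [hsq x hx]
      have hlen0 : linha0.length = (linha0 :: r1 :: rest2).length := hsq linha0 (by simp)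
      have hlen1 : r1.length = (linha0 :: r1 :: rest2).length := hsq r1 (by simp)
      have hBguard : ((linha0 :: r1 :: rest2).length < 2
          || (linha0 :: r1 :: rest2).any
              (fun linha => linha.length != (linha0 :: r1 :: rest2).length)) = false := by
        rw [hanyf]
        simp
      by_cases hones : linha0 = linha0.map (fun _ => (1 : Int))
      · -- all guards of A hold; B reaches its final all-expression
        have hAguard :
            (isMatrizQuadrada (linha0 :: r1 :: rest2)
              && (linha0 == linha0.map fun _ => (1 : Int))
              && decide ((linha0 :: r1 :: rest2).length > 1)) = true := by
          unfold isMatrizQuadrada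
          rw [hquad, ← hones]
          simp
        have hA : isMatrizDeVandermonde (linha0 :: r1 :: rest2)
            = pvOuterLoop r1 rest2 1 true := by
          simp only [isMatrizDeVandermonde]
          rw [if_pos hAguard]
          rfl
        have honesAny : (((linha0 :: r1 :: rest2).getD 0 []).any (fun x => x != 1)) = false := by
          simp only [List.getD_cons_zero, List.any_eq_false]
          intro x hx
          obtain ⟨k, hk, rfl⟩ := List.mem_iff_getElem.mp hx
          have := List.getElem_of_eq hones hk
          simp only [List.getElem_map] at this
          simp [this]
        have hB : isMatrizDeVandermonde_alt (linha0 :: r1 :: rest2)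
            = (((linha0 :: r1 :: rest2).zip ((linha0 :: r1 :: rest2).drop 1)).all (fun pc =>
                ((pc.1.zip pc.2).zip ((linha0 :: r1 :: rest2).getD 1 [])).all (fun t =>
                  t.1.2 == t.1.1 * t.2))) := by
          simp only [isMatrizDeVandermonde_alt]
          rw [if_neg (by rw [hBguard]; exact Bool.false_ne_true), if_neg (by rw [honesAny]; exact Bool.false_ne_true)]
        rw [hA, hB]
        apply Bool.eq_iff_iff.mpr
        have hget1 : (linha0 :: r1 :: rest2).getD 1 [] = r1 := by simp
        rw [hget1, pvOuterLoop_char,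
            pvBAll_char (linha0 :: r1 :: rest2) r1 hsq hlen1]
        -- both sides against the common power characterisation P
        set M := linha0 :: r1 :: rest2 with hM
        have hn : M.length = rest2.length + 2 := by simp [hM]
        have h0 : ∀ j, j < M.length → pvColv M j 0 = 1 := by
          intro j hj
          unfold pvColv
          have hj0 : j < linha0.length := by omega
          have : M.getD 0 [] = linha0 := by simp [hM]
          rw [this, List.getD_eq_getElem _ _ hj0, List.getElem_of_eq hones hj0]
          simp
        have h1 : ∀ j, pvColv M j 1 = r1.getD j 0 := by
          intro j
          unfold pvColv
          simp [hM]
        have hrow : ∀ i (h : i < rest2.length) , M.getD (i + 2) [] = rest2[i] := by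
          intro i h
          have : M.getD (i + 2) [] = rest2.getD i [] := by simp [hM]
          rw [this, List.getD_eq_getElem _ _ h]
        have hrlen : ∀ i (h : i < rest2.length), rest2[i].length = M.length := by
          intro i h
          exact hsq _ (by simp [hM, List.getElem_mem h])
        constructor
        · intro hL i hi j hj
          -- turn the inner-loop facts into the power characterisation, then use the recurrence lemma backwards
          have hP : ∀ j, j < M.length → ∀ i, i < M.length → pvColv M j i = (r1.getD j 0) ^ i := by
            intro j hj i hi
            match i with
            | 0 => rw [h0 j hj]; simp
            | 1 => rw [h1 j]; simp
            | (k + 2) =>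
              have hk : k < rest2.length := by omega
              have := hL k hk
              rw [pvInnerLoop_eq, decide_eq_true_eq] at this
              have hjk : j < rest2[k].length := by rw [hrlen k hk]; omega
              have h3 := this j (Nat.zero_le j) hjk
              unfold pvColv
              rw [hrow k hk, h3]
              congr 1
              omega
          rw [hP j hj (i + 1) hi, hP j hj i (by omega)]
          ring
        · intro hR i hi
          rw [pvInnerLoop_eq, decide_eq_true_eq]
          intro k _ hk
          have hkM : k < M.length := by rw [← hrlen i hi]; exact hk
          have hP : pvColv M k (i + 2) = (r1.getD k 0) ^ (i + 2) :=
            (pvColRec_iff M.length (pvColv M k) (r1.getD k 0) (h0 k hkM)).mp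
              (fun i' hi' => hR i' hi' k hkM) (i + 2) (by omega)
          unfold pvColv at hP
          rw [hrow i hi] at hP
          rw [hP]
          congr 1
          omega
      · -- row 0 is not all ones: both sides false
        have hA : isMatrizDeVandermonde (linha0 :: r1 :: rest2) = false := by
          simp only [isMatrizDeVandermonde]
          rw [if_neg]
          intro hg
          rw [Bool.and_eq_true, Bool.and_eq_true] at hg
          exact hones ((beq_iff_eq).mp hg.1.2)
        have honesAny : (((linha0 :: r1 :: rest2).getD 0 []).any (fun x => x != 1)) = true := by
          simp only [List.getD_cons_zero, List.any_eq_true]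
          by_contra hno
          apply hones
          push Not at hno
          apply List.ext_getElem (by simp)
          intro k hk1 hk2
          have := hno linha0[k] (List.getElem_mem hk1)
          simp only [bne_iff_ne, ne_eq, not_not] at this
          simpa using this
        have hB : isMatrizDeVandermonde_alt (linha0 :: r1 :: rest2) = false := by
          simp only [isMatrizDeVandermonde_alt]
          rw [if_neg (by rw [hBguard]; exact Bool.false_ne_true), if_pos honesAny]
        rw [hA, hB]
    · -- not square: both sides false
      have hquad : pvQuadLoop (linha0 :: r1 :: rest2).length (linha0 :: r1 :: rest2) = false := by
        rw [pvQuadLoop_eq_all]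
        simp only [List.all_eq_false]
        push Not at hsq
        obtain ⟨r, hr, hne⟩ := hsq
        exact ⟨r, hr, by simpa using hne⟩
      have hany : ((linha0 :: r1 :: rest2).any
          fun linha => linha.length != (linha0 :: r1 :: rest2).length) = true := by
        simp only [List.any_eq_true]
        push Not at hsq
        obtain ⟨r, hr, hne⟩ := hsq
        exact ⟨r, hr, by simpa using hne⟩
      have hA : isMatrizDeVandermonde (linha0 :: r1 :: rest2) = false := by
        simp only [isMatrizDeVandermonde]
        rw [if_neg]
        intro hg
        rw [Bool.and_eq_true, Bool.and_eq_true] at hg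
        have hq := hg.1.1
        unfold isMatrizQuadrada at hq
        rw [hquad] at hq
        exact Bool.false_ne_true hq
      have hB : isMatrizDeVandermonde_alt (linha0 :: r1 :: rest2) = false := by
        simp only [isMatrizDeVandermonde_alt]
        rw [if_pos (by rw [hany]; simp)]
      rw [hA, hB]
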